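-- pv_equiv track=rewrite | github.com/SpaceMonkey1347/domobot | cipher.py | nykro_cipher
-- ===== SOURCE A (Python) =====
-- allowed_chars = []
--
-- def nykro_cipher(message: str, encipher: bool):
--     message = message.upper()
--     output = ''
--     incr = 1
--     if not encipher:
--         incr = -1
--
--     for char in message:
--         if char not in allowed_chars:
--             output += char
--             continue
--
--         val = allowed_chars.index(char)
--         val = val + incr
--         while val < 0:
--             val = val + len(allowed_chars)
--         outchar = allowed_chars[val % len(allowed_chars)]
--         output += outchar
--
--         if incr < 0:
--             incr = incr * -1 + 1
--         else:
--             incr = incr * -1 - 1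
--     return output
-- ===== SOURCE B (Python) =====
-- def nykro_cipher(message: str, encipher: bool):
--     # allowed_chars is empty in this module, so the cipher branch is unreachable:
--     # the function is exactly str.upper.
--     return message.upper()
-- ===== Notes on version B (the rewrite author's own statement) =====
-- stated objective: simpler
-- what changed: Replaced the per-character loop with a direct message.upper(): since the module-level allowed_chars list is empty, the whole cipher branch (index/modular shift, incr toggling) is dead code and A always returns the uppercased message.
import Mathlib
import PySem

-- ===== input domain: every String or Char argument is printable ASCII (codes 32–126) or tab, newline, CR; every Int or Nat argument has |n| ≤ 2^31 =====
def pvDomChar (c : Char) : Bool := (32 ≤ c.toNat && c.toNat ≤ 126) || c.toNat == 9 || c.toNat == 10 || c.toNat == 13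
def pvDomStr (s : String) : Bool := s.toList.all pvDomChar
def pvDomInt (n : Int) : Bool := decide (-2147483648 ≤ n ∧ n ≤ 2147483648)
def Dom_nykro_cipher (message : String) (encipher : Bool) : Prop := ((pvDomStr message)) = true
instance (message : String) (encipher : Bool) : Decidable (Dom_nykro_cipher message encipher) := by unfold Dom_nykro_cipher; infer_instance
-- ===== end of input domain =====

-- ===== PORT A =====
-- B replaces A's per-character loop with a direct .upper(): allowed_chars = [] makes A's cipher branch dead code (simpler).
def pvAllowedChars : List Char := []

-- while val < 0: val = val + n   (the n = 0 guard only makes the dead branch total; Python would loop forever there)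
def pvWhileNeg (val : Int) (n : Nat) : Int :=
  if h : val < 0 then (if hn : n = 0 then val else pvWhileNeg (val + n) n) else val
termination_by (-val).toNat
decreasing_by omega

-- the body of A's for-loop, one character at a time
def pvStep (st : String × Int) (char : Char) : String × Int :=
  let (output, incr) := st
  if char ∉ pvAllowedChars then
    (output.push char, incr)
  else
    let val := ((PySem.List.index? pvAllowedChars char).getD 0)
    let val := val + incr
    let val := pvWhileNeg val pvAllowedChars.length
    -- allowed_chars[val % len]; the .getD ' ' / mod-by-zero guard is only reached in the dead branch
    let outchar := (PySem.List.pyGet? pvAllowedChars (if pvAllowedChars.length = 0 then 0 else PySem.Int.mod val pvAllowedChars.length)).getD ' '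
    let incr := if incr < 0 then incr * (-1) + 1 else incr * (-1) - 1
    (output.push outchar, incr)

def nykro_cipher (message : String) (encipher : Bool) : String :=
  let message := PySem.Str.upper message
  let incr : Int := if !encipher then -1 else 1
  (message.toList.foldl pvStep ("", incr)).1

-- ===== PORT B =====
def nykro_cipher_alt (message : String) (encipher : Bool) : String :=
  PySem.Str.upper message

-- ===== PRECONDITION & SPEC =====
def Spec_nykro_cipher (message : String) (encipher : Bool) (out : String) : Prop := out = nykro_cipher_alt message encipher
instance (message : String) (encipher : Bool) (out : String) : Decidable (Spec_nykro_cipher message encipher out) := by unfold Spec_nykro_cipher; infer_instance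

-- ===== CLAIM (what is proved, stated in full; the proofs are below) =====
def Claim_equal_nykro_cipher : Prop := ∀ (message : String) (encipher : Bool), Dom_nykro_cipher message encipher → Spec_nykro_cipher message encipher (nykro_cipher message encipher)

-- ===== LEMMAS AND PROOFS =====

-- ===== VERDICT (by name: the statement is the Claim_ definition above) =====
-- every character falls into the `continue` branch (pvAllowedChars = []), so the fold just appends it
theorem pv_foldl_upper (cs : List Char) (out : String) (i : Int) :
    (cs.foldl pvStep (out, i)).1 = out ++ String.ofList cs := by
  induction cs generalizing out i with
  | nil => apply String.ext; simp
  | cons c cs ih =>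
    rw [List.foldl_cons, pvStep, if_pos (by simp [pvAllowedChars]), ih]
    apply String.ext
    simp

theorem nykro_cipher_spec : Claim_equal_nykro_cipher := by
  intro message encipher _
  unfold Spec_nykro_cipher nykro_cipher nykro_cipher_alt
  rw [pv_foldl_upper]
  apply String.ext
  simp [PySem.Str.upper]
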